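-- pv_equiv track=rewrite | github.com/codingksj/Baekjoon-Solution | 백준/01000~01999/01500~01599/01544.py | check_cycle_same
-- ===== SOURCE A (Python) =====
-- def check_cycle_same(wordSet: list[str],
--                      word : str) -> bool:
--
--     length = len(word)
--
--     for i in range(length):
--         rotate_word = word[i:] + word[:i]
--         if rotate_word in wordSet:
--             return True
--
--     return False
-- ===== SOURCE B (Python) =====
-- def check_cycle_same(wordSet: list[str],
--                      word : str) -> bool:
--     length = len(word)
--     if length == 0:
--         return False
--     doubled = word + word
--     for w in wordSet:
--         if len(w) == length and w in doubled:
--             return True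
--     return False
-- ===== Notes on version B (the rewrite author's own statement) =====
-- stated objective: faster
-- what changed: Instead of generating every rotation of word and testing list membership for each, B builds word+word once and scans wordSet once, accepting a candidate iff it has word's length and occurs as a substring of the doubled string (the standard rotation test).
import Mathlib
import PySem

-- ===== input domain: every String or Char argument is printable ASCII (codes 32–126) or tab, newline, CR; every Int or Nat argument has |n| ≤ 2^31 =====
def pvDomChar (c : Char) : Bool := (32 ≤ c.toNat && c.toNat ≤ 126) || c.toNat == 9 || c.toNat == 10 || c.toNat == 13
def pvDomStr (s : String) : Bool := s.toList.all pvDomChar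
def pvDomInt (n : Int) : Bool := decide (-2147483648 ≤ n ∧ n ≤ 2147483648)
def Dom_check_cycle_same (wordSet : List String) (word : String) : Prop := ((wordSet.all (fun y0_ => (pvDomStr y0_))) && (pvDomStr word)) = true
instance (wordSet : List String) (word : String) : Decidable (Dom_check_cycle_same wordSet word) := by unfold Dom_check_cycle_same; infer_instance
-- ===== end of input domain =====

-- B replaces A's "build each rotation and test list membership" with the doubled-string
-- rotation test (one pass over wordSet checking length and substring of word+word); alternative algorithm, equivalence of return values proved.


-- ===== PORT A =====
-- for i in range(len(word)): rotate_word = word[i:] + word[:i]; if rotate_word in wordSet: return True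
def check_cycle_same (wordSet : List String) (word : String) : Bool :=
  let length := PySem.Str.len word
  (PySem.List.pyRange 0 length 1).any (fun i =>
    let rotate_word := PySem.Chars.slice word.toList (some i) none ++
                       PySem.Chars.slice word.toList none (some i)
    wordSet.any (fun w => w.toList == rotate_word))

-- ===== PORT B =====
-- length-0 guard, doubled = word + word, then one pass over wordSet testing length and substring
def check_cycle_same_alt (wordSet : List String) (word : String) : Bool :=
  let wl := word.toList
  let length := wl.length
  if length = 0 then false
  else
    let doubled := wl ++ wl
    wordSet.any (fun w => w.toList.length == length && PySem.Chars.isIn w.toList doubled)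

-- ===== PRECONDITION & SPEC =====
def Spec_check_cycle_same (wordSet : List String) (word : String) (out : Bool) : Prop := out = check_cycle_same_alt wordSet word
instance (wordSet : List String) (word : String) (out : Bool) : Decidable (Spec_check_cycle_same wordSet word out) := by unfold Spec_check_cycle_same; infer_instance

-- ===== CLAIM (what is proved, stated in full; the proofs are below) =====
def Claim_equal_check_cycle_same : Prop := ∀ (wordSet : List String) (word : String), Dom_check_cycle_same wordSet word → Spec_check_cycle_same wordSet word (check_cycle_same wordSet word)

-- ===== LEMMAS AND PROOFS =====

-- the length-|l| block of l ++ l starting at i ≤ |l| is the i-th rotation of l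
lemma rot_take (l : List Char) (i : ℕ) (h : i ≤ l.length) :
    ((l ++ l).drop i).take l.length = l.drop i ++ l.take i := by
  rw [List.drop_append_of_le_length h, List.take_append]
  congr 1
  · exact List.take_of_length_le (by simp)
  · congr 1; simp; omega

-- doubled-string rotation lemma: for nonempty l, t is a rotation of l
-- iff t has the same length and is a substring of l ++ l
lemma rot_iff (l t : List Char) (h : 0 < l.length) :
    (∃ i : ℕ, i < l.length ∧ t = l.drop i ++ l.take i) ↔
      (t.length = l.length ∧ t <:+: l ++ l) := by
  constructor
  · rintro ⟨i, hi, rfl⟩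
    refine ⟨by simp; omega, ⟨l.take i, l.drop i, ?_⟩⟩
    simp [List.append_assoc]
    rw [← List.append_assoc, List.take_append_drop]
  · rintro ⟨hlen, ⟨s, u, hsu⟩⟩
    have ht : t = ((l ++ l).drop s.length).take l.length := by
      rw [← hsu]
      rw [List.append_assoc, List.drop_left, ← hlen, List.take_left]
    have hs : s.length ≤ l.length := by
      have := congrArg List.length hsu
      simp at this; omega
    rw [rot_take l s.length hs] at ht
    rcases lt_or_eq_of_le hs with h' | h'
    · exact ⟨s.length, h', ht⟩
    · refine ⟨0, h, ?_⟩
      simpa [h'] using ht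

lemma check_cycle_same_eq_alt (wordSet : List String) (word : String) :
    check_cycle_same wordSet word = check_cycle_same_alt wordSet word := by
  set l := word.toList with hl
  by_cases hn : l.length = 0
  · simp [check_cycle_same, check_cycle_same_alt, ← hl, hn]
  have hA : (check_cycle_same wordSet word = true) ↔
      ∃ i : ℕ, i < l.length ∧ ∃ w ∈ wordSet, w.toList = l.drop i ++ l.take i := by
    simp only [check_cycle_same, List.any_eq_true, PySem.List.mem_pyRange_one,
      beq_iff_eq, PySem.Chars.slice_eq_listSlice, ← hl]
    have hlen : PySem.Str.len word = (l.length : Int) := by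
      simp [PySem.Str.len, hl]
    rw [hlen]
    constructor
    · rintro ⟨i, ⟨h0, hi⟩, w, hw, hweq⟩
      refine ⟨i.toNat, by omega, w, hw, ?_⟩
      rw [PySem.List.slice_from l h0, PySem.List.slice_to l h0] at hweq
      exact hweq
    · rintro ⟨i, hi, w, hw, hweq⟩
      refine ⟨(i : Int), ⟨by exact Int.natCast_nonneg i, by exact_mod_cast hi⟩, w, hw, ?_⟩
      rw [PySem.List.slice_from l (by exact Int.natCast_nonneg i),
          PySem.List.slice_to l (by exact Int.natCast_nonneg i)]
      simpa using hweq
  have hB : (check_cycle_same_alt wordSet word = true) ↔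
      ∃ w ∈ wordSet, w.toList.length = l.length ∧ w.toList <:+: l ++ l := by
    simp [check_cycle_same_alt, ← hl, hn, List.any_eq_true, Bool.and_eq_true,
      beq_iff_eq, PySem.Chars.isIn_iff_infix]
  rw [Bool.eq_iff_iff, hA, hB]
  constructor
  · rintro ⟨i, hi, w, hw, hweq⟩
    exact ⟨w, hw, (rot_iff l w.toList (Nat.pos_of_ne_zero hn)).mp ⟨i, hi, hweq⟩⟩
  · rintro ⟨w, hw, hlen, hinf⟩
    obtain ⟨i, hi, hweq⟩ := (rot_iff l w.toList (Nat.pos_of_ne_zero hn)).mpr ⟨hlen, hinf⟩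
    exact ⟨i, hi, w, hw, hweq⟩

-- ===== VERDICT (by name: the statement is the Claim_ definition above) =====
theorem check_cycle_same_spec : Claim_equal_check_cycle_same := by
  intro wordSet word _
  unfold Spec_check_cycle_same
  exact check_cycle_same_eq_alt wordSet word
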